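-- pv_equiv track=rewrite | github.com/marcustut/aws-live | query.py | build_employee_view_update_query
-- ===== SOURCE A (Python) =====
-- from typing import List
--
-- employee_columns = ['salary', 'role', 'start_at', 'end_at']
--
-- department_columns = ['name', 'description']
--
-- address_columns = ['city', 'line1', 'line2', 'state', 'country', 'postal_code']
--
-- user_columns = ['email', 'username', 'password_hash', 'phone_number',
--                 'first_name', 'last_name', 'dob', 'gender', 'avatar_url']
--
-- def build_employee_view_update_query(username: str, params: List[str]) -> tuple[str, str, str, str]:
--     if len(params) == 0:
--         raise Exception("update params cannot be empty")
--
--     employee_params = [p for p in params if p in employee_columns]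
--     user_params = [p for p in params if p in user_columns]
--     department_params = [p for p in params if p in department_columns]
--     address_params = [p for p in params if p in address_columns]
--
--     update_employee_sql = "UPDATE `employee` AS e, `user` AS u SET " + \
--             _get_dynamic_update_params(employee_params) + f" WHERE e.user_id = u.user_id AND u.username = %s"
--
--     update_user_params = "UPDATE `user` SET " + \
--             _get_dynamic_update_params(user_params) + f" WHERE username = %s"
--
--     update_department_params = "UPDATE `department` AS d, `user` AS u, `employee` AS e SET " + \
--             _get_dynamic_update_params(department_params) + f" WHERE u.username = %s AND u.user_id = e.user_id AND e.department_id = d.department_id"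
--
--     update_address_params = "UPDATE `address` AS a, `user` AS u, `employee` AS e SET " + \
--             _get_dynamic_update_params(address_params) + f" WHERE u.username = %s AND u.user_id = e.user_id AND e.department_id = d.department_id"
--
--     return update_employee_sql, update_user_params, update_department_params, update_address_params
--
-- def _get_dynamic_update_params(params: List[str]) -> str:
--     # this construct the middle part of the query
--     return "".join(map(lambda x: f"{x} = %s, ", params))[:-2]
-- ===== SOURCE B (Python) =====
-- from typing import List
--
-- employee_columns = ['salary', 'role', 'start_at', 'end_at']
--
-- department_columns = ['name', 'description']
--
-- address_columns = ['city', 'line1', 'line2', 'state', 'country', 'postal_code']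
--
-- user_columns = ['email', 'username', 'password_hash', 'phone_number',
--                 'first_name', 'last_name', 'dob', 'gender', 'avatar_url']
--
--
-- def _set_clause(cols: List[str]) -> str:
--     return ", ".join(c + " = %s" for c in cols)
--
--
-- def build_employee_view_update_query(username: str, params: List[str]) -> tuple[str, str, str, str]:
--     # one routing dict built once from the four column lists
--     pairs = []
--     for i, cols in enumerate((employee_columns, user_columns,
--                               department_columns, address_columns)):
--         for c in cols:
--             pairs.append((c, i))
--     category = dict(pairs)
--
--     buckets = ([], [], [], [])
--     for p in params:
--         i = category.get(p)
--         if i is not None: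
--             buckets[i].append(p)
--
--     return (
--         "UPDATE `employee` AS e, `user` AS u SET " + _set_clause(buckets[0])
--             + " WHERE e.user_id = u.user_id AND u.username = %s",
--         "UPDATE `user` SET " + _set_clause(buckets[1]) + " WHERE username = %s",
--         "UPDATE `department` AS d, `user` AS u, `employee` AS e SET " + _set_clause(buckets[2])
--             + " WHERE u.username = %s AND u.user_id = e.user_id AND e.department_id = d.department_id",
--         "UPDATE `address` AS a, `user` AS u, `employee` AS e SET " + _set_clause(buckets[3])
--             + " WHERE u.username = %s AND u.user_id = e.user_id AND e.department_id = d.department_id",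
--     )
-- ===== Notes on version B (the rewrite author's own statement) =====
-- stated objective: alternative
-- what changed: Replaces four independent membership-filter passes over params with a column->category dict built once from the four column lists plus a single routing pass that appends each known param to its bucket, and builds each SET clause with ', '.join instead of building-with-trailing-comma-then-slicing.
import Mathlib
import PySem

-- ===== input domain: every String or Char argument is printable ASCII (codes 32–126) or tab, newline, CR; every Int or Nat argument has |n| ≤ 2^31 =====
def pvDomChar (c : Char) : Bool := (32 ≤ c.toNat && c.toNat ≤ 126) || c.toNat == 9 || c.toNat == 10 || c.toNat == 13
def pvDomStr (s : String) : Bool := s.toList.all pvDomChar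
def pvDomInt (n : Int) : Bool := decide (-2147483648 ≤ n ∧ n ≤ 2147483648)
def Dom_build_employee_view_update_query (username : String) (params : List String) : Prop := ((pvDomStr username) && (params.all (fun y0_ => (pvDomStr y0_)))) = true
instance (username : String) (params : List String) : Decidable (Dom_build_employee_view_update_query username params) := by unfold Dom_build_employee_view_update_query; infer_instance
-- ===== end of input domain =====

-- B replaces A's four membership-filter passes by one dict-routed pass over params and
-- builds each SET clause with ", ".join; same return value wherever A returns (params ≠ []).


-- ===== PORT A =====
def pv_employee_columns : List String := ["salary", "role", "start_at", "end_at"]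
def pv_department_columns : List String := ["name", "description"]
def pv_address_columns : List String := ["city", "line1", "line2", "state", "country", "postal_code"]
def pv_user_columns : List String := ["email", "username", "password_hash", "phone_number",
  "first_name", "last_name", "dob", "gender", "avatar_url"]

-- "".join(map(lambda x: f"{x} = %s, ", params))[:-2]   (string work done on List Char, per the PySem convention)
def pv_get_dynamic_update_params (params : List String) : List Char :=
  PySem.List.slice (PySem.Chars.join [] (params.map (fun x => x.toList ++ " = %s, ".toList))) none (some (-2))

-- Python A raises on params = []; Pre_ excludes that input and the port computes the body unconditionally.
def build_employee_view_update_query (username : String) (params : List String) : String × String × String × String :=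
  let employee_params := params.filter (fun p => pv_employee_columns.contains p)
  let user_params := params.filter (fun p => pv_user_columns.contains p)
  let department_params := params.filter (fun p => pv_department_columns.contains p)
  let address_params := params.filter (fun p => pv_address_columns.contains p)
  let update_employee_sql := String.ofList ("UPDATE `employee` AS e, `user` AS u SET ".toList
    ++ pv_get_dynamic_update_params employee_params
    ++ " WHERE e.user_id = u.user_id AND u.username = %s".toList)
  let update_user_params := String.ofList ("UPDATE `user` SET ".toList
    ++ pv_get_dynamic_update_params user_params
    ++ " WHERE username = %s".toList)
  let update_department_params := String.ofList ("UPDATE `department` AS d, `user` AS u, `employee` AS e SET ".toList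
    ++ pv_get_dynamic_update_params department_params
    ++ " WHERE u.username = %s AND u.user_id = e.user_id AND e.department_id = d.department_id".toList)
  let update_address_params := String.ofList ("UPDATE `address` AS a, `user` AS u, `employee` AS e SET ".toList
    ++ pv_get_dynamic_update_params address_params
    ++ " WHERE u.username = %s AND u.user_id = e.user_id AND e.department_id = d.department_id".toList)
  (update_employee_sql, update_user_params, update_department_params, update_address_params)

-- ===== PORT B =====
-- ", ".join(c + " = %s" for c in cols)
def pv_set_clause (cols : List String) : List Char :=
  PySem.Chars.join ", ".toList (cols.map (fun c => c.toList ++ " = %s".toList))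

-- pairs built by the two nested loops, then category = dict(pairs)
def pv_category : PySem.Dict String Int :=
  PySem.Dict.ofList
    ([(pv_employee_columns, (0 : Int)), (pv_user_columns, 1), (pv_department_columns, 2), (pv_address_columns, 3)].foldl
      (fun pairs ic => ic.1.foldl (fun pairs c => pairs ++ [(c, ic.2)]) pairs) [])

-- body of 'for p in params': i = category.get(p); if i is not None: buckets[i].append(p)
def pv_route (b : List String × List String × List String × List String) (p : String) :
    List String × List String × List String × List String :=
  match pv_category.get? p with
  | none => b
  | some i =>
    if i = 0 then (b.1 ++ [p], b.2.1, b.2.2.1, b.2.2.2)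
    else if i = 1 then (b.1, b.2.1 ++ [p], b.2.2.1, b.2.2.2)
    else if i = 2 then (b.1, b.2.1, b.2.2.1 ++ [p], b.2.2.2)
    else (b.1, b.2.1, b.2.2.1, b.2.2.2 ++ [p])

def build_employee_view_update_query_alt (username : String) (params : List String) : String × String × String × String :=
  let buckets := params.foldl pv_route ([], [], [], [])
  (String.ofList ("UPDATE `employee` AS e, `user` AS u SET ".toList ++ pv_set_clause buckets.1
     ++ " WHERE e.user_id = u.user_id AND u.username = %s".toList),
   String.ofList ("UPDATE `user` SET ".toList ++ pv_set_clause buckets.2.1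
     ++ " WHERE username = %s".toList),
   String.ofList ("UPDATE `department` AS d, `user` AS u, `employee` AS e SET ".toList ++ pv_set_clause buckets.2.2.1
     ++ " WHERE u.username = %s AND u.user_id = e.user_id AND e.department_id = d.department_id".toList),
   String.ofList ("UPDATE `address` AS a, `user` AS u, `employee` AS e SET ".toList ++ pv_set_clause buckets.2.2.2
     ++ " WHERE u.username = %s AND u.user_id = e.user_id AND e.department_id = d.department_id".toList))

-- ===== PRECONDITION & SPEC =====
-- Python A raises Exception on empty params; Pre_ excludes exactly that.
def Pre_build_employee_view_update_query (username : String) (params : List String) : Prop := params ≠ []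
instance (username : String) (params : List String) : Decidable (Pre_build_employee_view_update_query username params) := by unfold Pre_build_employee_view_update_query; infer_instance
def pvWitness_build_employee_view_update_query : String × List String := ("alice", ["salary", "email", "city"])

def Spec_build_employee_view_update_query (username : String) (params : List String) (out : String × String × String × String) : Prop := out = build_employee_view_update_query_alt username params
instance (username : String) (params : List String) (out : String × String × String × String) : Decidable (Spec_build_employee_view_update_query username params out) := by unfold Spec_build_employee_view_update_query; infer_instance

-- ===== CLAIM (what is proved, stated in full; the proofs are below) =====
def Claim_equal_build_employee_view_update_query : Prop := ∀ (username : String) (params : List String), Dom_build_employee_view_update_query username params → Pre_build_employee_view_update_query username params → Spec_build_employee_view_update_query username params (build_employee_view_update_query username params)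

-- ===== LEMMAS AND PROOFS =====

-- joining "x = %s, " pieces with no separator = joining "x = %s" pieces with ", " plus one trailing ", "
lemma pv_join_aux (x : String) (ps : List String) :
    PySem.Chars.join [] ((x :: ps).map (fun x => x.toList ++ " = %s, ".toList)) =
    PySem.Chars.join ", ".toList ((x :: ps).map (fun x => x.toList ++ " = %s".toList)) ++ ", ".toList := by
  induction ps generalizing x with
  | nil => simp [PySem.Chars.join_singleton]
  | cons y ps ih =>
    simp only [List.map_cons] at *
    rw [PySem.Chars.join_cons_cons, PySem.Chars.join_cons_cons, ih y]
    simp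

-- A's trailing-comma clause equals B's ", ".join clause
lemma pv_clause_eq (ps : List String) : pv_get_dynamic_update_params ps = pv_set_clause ps := by
  cases ps with
  | nil => decide
  | cons x ps =>
    unfold pv_get_dynamic_update_params pv_set_clause
    rw [pv_join_aux, PySem.List.slice_to_neg_ofNat _ 2 (by omega)]
    simp

-- first-match lookup in a block of constant-valued keys
set_option maxRecDepth 4096 in
lemma pv_lookup_block (cols : List String) (i : Int) (rest : List (String × Int)) (p : String) :
    (PySem.Dict.mk (cols.map (fun c => (c, i)) ++ rest)).get? p =
    if p ∈ cols then some i else (PySem.Dict.mk rest).get? p := by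
  induction cols with
  | nil => simp
  | cons c cs ih =>
    simp only [List.map_cons, List.cons_append, PySem.Dict.get?_mk_cons, ih, List.mem_cons]
    by_cases h : c = p <;> by_cases h2 : p ∈ cs <;> simp [h, h2] <;>
      exact fun hpc => absurd hpc.symm h

-- the routing dict classifies exactly by the four column lists
lemma pv_cat_get (p : String) :
    pv_category.get? p =
    if p ∈ pv_employee_columns then some 0
    else if p ∈ pv_user_columns then some 1
    else if p ∈ pv_department_columns then some 2
    else if p ∈ pv_address_columns then some 3
    else none := by
  rw [show pv_category = PySem.Dict.mk
      (pv_employee_columns.map (fun c => (c, (0 : Int))) ++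
       (pv_user_columns.map (fun c => (c, 1)) ++
        (pv_department_columns.map (fun c => (c, 2)) ++
         (pv_address_columns.map (fun c => (c, 3)) ++ [])))) from by decide]
  rw [pv_lookup_block, pv_lookup_block, pv_lookup_block, pv_lookup_block]
  rfl

-- the single routing pass produces exactly A's four filters
lemma pv_route_eq (params : List String) :
    ∀ e u d a, params.foldl pv_route (e, u, d, a) =
      (e ++ params.filter (fun p => pv_employee_columns.contains p),
       u ++ params.filter (fun p => pv_user_columns.contains p),
       d ++ params.filter (fun p => pv_department_columns.contains p),
       a ++ params.filter (fun p => pv_address_columns.contains p)) := by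
  induction params with
  | nil => simp
  | cons p ps ih =>
    intro e u d a
    simp only [List.foldl_cons, List.filter_cons]
    rw [show pv_route (e, u, d, a) p =
      (if p ∈ pv_employee_columns then (e ++ [p], u, d, a)
       else if p ∈ pv_user_columns then (e, u ++ [p], d, a)
       else if p ∈ pv_department_columns then (e, u, d ++ [p], a)
       else if p ∈ pv_address_columns then (e, u, d, a ++ [p])
       else (e, u, d, a)) from by
        unfold pv_route; rw [pv_cat_get p]; split_ifs <;> simp]
    by_cases h1 : p ∈ pv_employee_columns
    · have h2 : p ∉ pv_user_columns := by fin_cases h1 <;> simp [pv_user_columns]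
      have h3 : p ∉ pv_department_columns := by fin_cases h1 <;> simp [pv_department_columns]
      have h4 : p ∉ pv_address_columns := by fin_cases h1 <;> simp [pv_address_columns]
      simp [h1, h2, h3, h4, ih]
    · by_cases h2 : p ∈ pv_user_columns
      · have h3 : p ∉ pv_department_columns := by fin_cases h2 <;> simp [pv_department_columns]
        have h4 : p ∉ pv_address_columns := by fin_cases h2 <;> simp [pv_address_columns]
        simp [h1, h2, h3, h4, ih]
      · by_cases h3 : p ∈ pv_department_columns
        · have h4 : p ∉ pv_address_columns := by fin_cases h3 <;> simp [pv_address_columns]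
          simp [h1, h2, h3, h4, ih]
        · by_cases h4 : p ∈ pv_address_columns <;> simp [h1, h2, h3, h4, ih]

-- ===== VERDICT (by name: the statement is the Claim_ definition above) =====
theorem build_employee_view_update_query_spec : Claim_equal_build_employee_view_update_query := by
  intro username params _ _
  unfold Spec_build_employee_view_update_query
  unfold build_employee_view_update_query build_employee_view_update_query_alt
  rw [pv_route_eq]
  simp only [List.nil_append, pv_clause_eq]
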